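-- pv_equiv track=rewrite | github.com/KarolBurczyk/CoursesUwr | 1 sem/Python/kolos/2019_3.py | f
-- ===== SOURCE A (Python) =====
-- def f(s):
--     res = []
--     for i in range(len(s)):
--         a = s[i]
--         if a in s[i+1:]:
--             res.append(a.upper()) # "ala8".upper() == "ALA8"
--     if not res:
--         res = list(s)
--     return ''.join(res) + '!'
-- ===== SOURCE B (Python) =====
-- def f(s):
--     counts = {}
--     for ch in s:
--         counts[ch] = counts.get(ch, 0) + 1
--     out = []
--     for ch in s:
--         counts[ch] -= 1
--         if counts[ch] > 0:
--             out.append(ch.upper())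
--     return (''.join(out) or s) + '!'
-- ===== Notes on version B (the rewrite author's own statement) =====
-- stated objective: faster
-- what changed: Replaces the per-index substring scan of the rest of the string (quadratic) by a character-count dictionary built in one pass and decremented while scanning, so the later-occurrence test becomes an O(1) counter lookup.
import Mathlib
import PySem

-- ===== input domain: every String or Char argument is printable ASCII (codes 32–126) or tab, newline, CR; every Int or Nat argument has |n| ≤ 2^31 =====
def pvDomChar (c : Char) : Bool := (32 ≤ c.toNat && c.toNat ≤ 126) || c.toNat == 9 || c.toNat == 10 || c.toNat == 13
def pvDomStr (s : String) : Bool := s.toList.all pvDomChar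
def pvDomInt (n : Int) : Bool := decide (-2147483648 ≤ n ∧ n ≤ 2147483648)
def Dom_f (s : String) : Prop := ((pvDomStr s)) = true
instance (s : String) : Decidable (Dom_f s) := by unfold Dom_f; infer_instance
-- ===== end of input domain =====

-- B replaces A's quadratic per-index scan of the remaining string by a one-pass
-- character-count dictionary decremented while scanning (objective: faster).


-- ===== PORT A =====
-- one loop step of A: a = s[i]; if a in s[i+1:]: res.append(a.upper())
def fStepA (cs : List Char) (res : List Char) (i : Int) : List Char :=
  match PySem.List.pyGet? cs i with
  | some a =>
      if PySem.Chars.isIn [a] (PySem.List.slice cs (some (i + 1)) none) then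
        res ++ [PySem.Chars.upperChar a]
      else res
  | none => res   -- unreachable: i ranges over range(len(s))

def f (s : String) : String :=
  let cs := s.toList
  let res := (PySem.List.pyRange 0 cs.length 1).foldl (fStepA cs) []
  let res := if res = [] then cs else res
  String.ofList (res ++ ['!'])

-- ===== PORT B =====
-- one step of B's scanning loop: counts[ch] -= 1; if counts[ch] > 0: out.append(ch.upper())
def fStepB (st : PySem.Dict Char Int × List Char) (ch : Char) : PySem.Dict Char Int × List Char :=
  let d := st.1.insert ch (st.1.getD ch 0 - 1)
  if d.getD ch 0 > 0 then (d, st.2 ++ [PySem.Chars.upperChar ch]) else (d, st.2)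

def f_alt (s : String) : String :=
  let cs := s.toList
  let counts := cs.foldl (fun d ch => d.insert ch (d.getD ch 0 + 1)) (PySem.Dict.empty : PySem.Dict Char Int)
  let st := cs.foldl fStepB (counts, [])
  let body := if String.ofList st.2 = "" then s else String.ofList st.2
  body ++ "!"

-- ===== PRECONDITION & SPEC =====
def Spec_f (s : String) (out : String) : Prop := out = f_alt s
instance (s : String) (out : String) : Decidable (Spec_f s out) := by unfold Spec_f; infer_instance

-- ===== CLAIM (what is proved, stated in full; the proofs are below) =====
def Claim_equal_f : Prop := ∀ (s : String), Dom_f s → Spec_f s (f s)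

-- ===== LEMMAS AND PROOFS =====

-- reference: the characters that reappear later, uppercased
def fRef : List Char → List Char
  | [] => []
  | c :: rest => (if c ∈ rest then [PySem.Chars.upperChar c] else []) ++ fRef rest

theorem fStepA_loop (pre suf acc : List Char) :
    (PySem.List.pyRange pre.length (pre ++ suf).length 1).foldl (fStepA (pre ++ suf)) acc
      = acc ++ fRef suf := by
  induction suf generalizing pre acc with
  | nil =>
      simp [PySem.List.pyRange_one_eq_nil, fRef]
  | cons c rest ih =>
      have hlt : (pre.length : Int) < ((pre ++ c :: rest).length : Int) := by
        simp
      rw [PySem.List.pyRange_one_cons hlt]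
      rw [List.foldl_cons]
      have hstep : fStepA (pre ++ c :: rest) acc (pre.length : Int)
          = acc ++ (if c ∈ rest then [PySem.Chars.upperChar c] else []) := by
        unfold fStepA
        rw [PySem.List.pyGet?_append_length]
        have hslice : PySem.List.slice (pre ++ c :: rest) (some ((pre.length : Int) + 1)) none = rest := by
          have : ((pre.length : Int) + 1) = ((pre.length + 1 : Nat) : Int) := by push_cast; ring
          rw [this, PySem.List.slice_from_natCast]
          have : pre ++ c :: rest = (pre ++ [c]) ++ rest := by simp
          rw [this]
          have hlen : (pre ++ [c]).length = pre.length + 1 := by simp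
          rw [← hlen, List.drop_left]
        have hiff : PySem.Chars.isIn [c] rest = true ↔ c ∈ rest := by
          rw [PySem.Chars.isIn_iff_infix]; exact List.singleton_infix_iff c rest
        rw [hslice]
        by_cases hc : c ∈ rest <;> simp [hiff, hc]
      rw [hstep]
      have hrw : pre ++ c :: rest = (pre ++ [c]) ++ rest := by simp
      have hlen : (pre.length : Int) + 1 = ((pre ++ [c]).length : Int) := by simp
      rw [hlen, hrw, ih (pre ++ [c])]
      simp [fRef]

theorem fStepB_loop (suf : List Char) (d : PySem.Dict Char Int) (acc : List Char)
    (hd : ∀ x, d.getD x 0 = (suf.count x : Int)) :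
    (suf.foldl fStepB (d, acc)).2 = acc ++ fRef suf := by
  induction suf generalizing d acc with
  | nil => simp [fRef]
  | cons c rest ih =>
      have hself : (d.insert c (d.getD c 0 - 1)).getD c 0 = (rest.count c : Int) := by
        rw [PySem.Dict.getD_insert, if_pos rfl, hd c]
        simp [List.count_cons_self]
      have hd' : ∀ x, (d.insert c (d.getD c 0 - 1)).getD x 0 = (rest.count x : Int) := by
        intro x
        rw [PySem.Dict.getD_insert]
        by_cases hx : x = c
        · subst hx; simpa using hself
        · rw [if_neg hx, hd x]
          have hcx : c ≠ x := fun h => hx h.symm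
          simp [hcx]
      have hstep : fStepB (d, acc) c
          = (d.insert c (d.getD c 0 - 1),
             acc ++ (if c ∈ rest then [PySem.Chars.upperChar c] else [])) := by
        unfold fStepB
        by_cases hmem : c ∈ rest
        · rw [if_pos (by rw [hself]; exact_mod_cast List.count_pos_iff.mpr hmem)]
          simp [hmem]
        · rw [if_neg (by rw [hself]; simp [List.count_eq_zero_of_not_mem hmem])]
          simp [hmem]
      rw [List.foldl_cons, hstep, ih _ _ hd']
      simp [fRef]

theorem counts_spec (cs : List Char) (x : Char) :
    (cs.foldl (fun d ch => d.insert ch (d.getD ch 0 + 1)) (PySem.Dict.empty : PySem.Dict Char Int)).getD x 0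
      = (cs.count x : Int) := by
  rw [PySem.Dict.getD_foldl_insert_add_one, PySem.Dict.getD_empty]
  simp

-- ===== VERDICT (by name: the statement is the Claim_ definition above) =====
theorem f_spec : Claim_equal_f := by
  intro s _
  unfold Spec_f f f_alt
  have hA := fStepA_loop [] s.toList []
  simp only [List.nil_append, List.length_nil, Nat.cast_zero] at hA
  have hB := fStepB_loop s.toList _ [] (counts_spec s.toList)
  simp only [List.nil_append] at hB
  simp only [hA, hB]
  by_cases h : fRef s.toList = []
  · simp [h]
  · rw [if_neg h, if_neg (by simpa using h)]
    simp
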